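-- pv_equiv track=rewrite | github.com/g8ed-vik/6thSem-TnTLab | 6th April Test/q1Spy.py | isSpy
-- ===== SOURCE A (Python) =====
-- def isSpy(n):
--     sum = 0
--     product = 1
--     while n > 0:
--         rem = n % 10
--         sum = sum + rem
--         product = product * rem
--         n = n // 10
--     if sum == product:
--         return True
--     else:
--         return False
-- ===== SOURCE B (Python) =====
-- def isSpy(n):
--     if n <= 0:
--         return False
--     digits = [int(c) for c in str(n)]
--     p = 1
--     for d in digits:
--         p *= d
--     return sum(digits) == p
-- ===== Notes on version B (the rewrite author's own statement) =====
-- stated objective: idiomatic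
-- what changed: B works on the decimal string representation (guard non-positive input, then compare sum and product of the digits taken from str of the input) instead of A's remainder/quotient extraction loop with two running accumulators.
import Mathlib
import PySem

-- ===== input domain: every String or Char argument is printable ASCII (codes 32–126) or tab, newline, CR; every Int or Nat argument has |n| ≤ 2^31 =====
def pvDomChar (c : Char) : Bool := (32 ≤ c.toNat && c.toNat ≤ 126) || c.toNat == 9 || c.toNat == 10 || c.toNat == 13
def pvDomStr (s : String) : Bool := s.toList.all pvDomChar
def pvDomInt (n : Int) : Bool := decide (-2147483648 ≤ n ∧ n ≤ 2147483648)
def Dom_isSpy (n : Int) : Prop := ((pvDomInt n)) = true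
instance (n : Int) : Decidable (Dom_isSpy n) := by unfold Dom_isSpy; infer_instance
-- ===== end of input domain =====

-- B checks sum==product of digits over the decimal string str(n) (after a n<=0 guard) instead of A's %10//10 loop; objective: idiomatic.


-- ===== PORT A =====
-- the while loop: state (n, sum, product)
def spyLoop (n sum product : Int) : Int × Int :=
  if n > 0 then
    spyLoop (PySem.Int.floordiv n 10) (sum + PySem.Int.mod n 10) (product * PySem.Int.mod n 10)
  else (sum, product)
termination_by n.toNat
decreasing_by
  rename_i h
  rw [PySem.Int.floordiv_eq_ediv_of_pos (by omega : (0:Int) < 10)]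
  omega

def isSpy (n : Int) : Bool :=
  let r := spyLoop n 0 1
  if r.1 = r.2 then true else false

-- ===== PORT B =====
def isSpy_alt (n : Int) : Bool :=
  if n ≤ 0 then false
  else
    -- digits = [int(c) for c in str(n)]  (int(c) via PySem.Int.ofChars?; every c here is a digit, so it never raises)
    let digits := (PySem.Int.toChars n).map (fun c => (PySem.Int.ofChars? [c]).getD 0)
    let p := digits.foldl (· * ·) 1
    digits.sum == p

-- ===== PRECONDITION & SPEC =====
def Spec_isSpy (n : Int) (out : Bool) : Prop := out = isSpy_alt n
instance (n : Int) (out : Bool) : Decidable (Spec_isSpy n out) := by unfold Spec_isSpy; infer_instance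

-- ===== CLAIM (what is proved, stated in full; the proofs are below) =====
def Claim_equal_isSpy : Prop := ∀ (n : Int), Dom_isSpy n → Spec_isSpy n (isSpy n)

-- ===== LEMMAS AND PROOFS =====

-- digit list of n (base 10, least significant first), as integers
def dInts (n : Int) : List Int := (Nat.digits 10 n.toNat).map Int.ofNat

-- A's loop computes sum + Σ digits and product * Π digits
lemma spyLoop_eq : ∀ (k : Nat) (n s p : Int), n.toNat ≤ k →
    spyLoop n s p = (s + (dInts n).sum, p * (dInts n).prod) := by
  intro k
  induction k with
  | zero =>
    intro n s p h
    rw [spyLoop]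
    have hn : ¬ n > 0 := by omega
    simp [hn, dInts, show n.toNat = 0 by omega]
  | succ k ih =>
    intro n s p h
    rw [spyLoop]
    by_cases hn : n > 0
    · have h10 : PySem.Int.floordiv n 10 = n / 10 :=
        PySem.Int.floordiv_eq_ediv_of_pos (by omega)
      have hm : PySem.Int.mod n 10 = n % 10 :=
        PySem.Int.mod_eq_emod_of_pos (by omega)
      simp only [hn, if_true, h10, hm]
      rw [ih (n / 10) _ _ (by omega)]
      have hd : Nat.digits 10 n.toNat = n.toNat % 10 :: Nat.digits 10 (n.toNat / 10) :=
        Nat.digits_def' (by omega) (by omega)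
      have h1 : (n / 10).toNat = n.toNat / 10 := by omega
      have h2 : n % 10 = ((n.toNat % 10 : Nat) : Int) := by omega
      simp only [dInts, hd, h1, List.map_cons, List.sum_cons, List.prod_cons, h2]
      refine Prod.ext ?_ ?_ <;> simp [Int.ofNat_eq_natCast] <;> ring
    · simp [hn, dInts, show n.toNat = 0 by omega]

-- Nat.toDigits via Nat.digits (positive n, enough fuel)
lemma toDigitsCore_eq : ∀ (f n : Nat) (ds : List Char), 0 < n → n < f →
    Nat.toDigitsCore 10 f n ds = ((Nat.digits 10 n).map Nat.digitChar).reverse ++ ds := by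
  intro f
  induction f with
  | zero => intro n ds h1 h2; omega
  | succ f ih =>
    intro n ds h1 h2
    rw [Nat.toDigitsCore]
    have hd : Nat.digits 10 n = n % 10 :: Nat.digits 10 (n / 10) :=
      Nat.digits_def' (by omega) h1
    by_cases hz : n / 10 = 0
    · simp [hz, hd]
    · have : n / 10 < f := by omega
      simp only [hz]
      rw [ih (n / 10) _ (by omega) this]
      simp [hd]

lemma toDigits_eq (n : Nat) (h : 0 < n) :
    Nat.toDigits 10 n = ((Nat.digits 10 n).map Nat.digitChar).reverse := by
  rw [Nat.toDigits]
  simpa using toDigitsCore_eq (n + 1) n [] h (by omega)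

lemma ofChars_digitChar (d : Nat) (h : d < 10) :
    (PySem.Int.ofChars? [Nat.digitChar d]).getD 0 = (d : Int) := by
  interval_cases d <;> decide

theorem isSpy_spec_aux (n : Int) : isSpy n = isSpy_alt n := by
  unfold isSpy isSpy_alt
  rw [spyLoop_eq n.toNat n 0 1 le_rfl]
  by_cases hn : n ≤ 0
  · have h0 : n.toNat = 0 := by omega
    simp [hn, dInts, h0]
  · simp only [hn, if_false]
    have hpos : 0 < n.toNat := by omega
    have hch : PySem.Int.toChars n = ((Nat.digits 10 n.toNat).map Nat.digitChar).reverse := by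
      unfold PySem.Int.toChars
      rw [if_neg (by omega)]
      exact toDigits_eq n.toNat hpos
    have hmap : (PySem.Int.toChars n).map (fun c => (PySem.Int.ofChars? [c]).getD 0)
        = (dInts n).reverse := by
      rw [hch, List.map_reverse, List.map_map, dInts]
      congr 1
      apply List.map_congr_left
      intro d hd
      exact ofChars_digitChar d (Nat.digits_lt_base (by omega) hd)
    rw [hmap]
    have hfold : (dInts n).reverse.foldl (· * ·) 1 = (dInts n).prod := by
      rw [List.prod_eq_foldl.symm, List.prod_reverse]
    rw [hfold, List.sum_reverse]
    by_cases h : (dInts n).sum = (dInts n).prod <;> simp [h]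

-- ===== VERDICT (by name: the statement is the Claim_ definition above) =====
theorem isSpy_spec : Claim_equal_isSpy := by
  intro n _
  unfold Spec_isSpy
  exact isSpy_spec_aux n
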